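-- pv_equiv track=rewrite | github.com/sven-warnke/who-knew-it | who_knew_it/streamlit_app.py | aggregate_house_points
-- ===== SOURCE A (Python) =====
-- HOUSE_PLAYER_ID_PREFIX = "house"
--
-- def get_house_player_id(i: int) -> str:
--     return f"{HOUSE_PLAYER_ID_PREFIX}_{i}"
--
-- def is_house_player_id(player_id: str) -> bool:
--     return player_id.startswith(HOUSE_PLAYER_ID_PREFIX)
--
-- def aggregate_house_points(player_points: dict[str, int]) -> dict[str, int]:
--     player_points = player_points.copy()
--     house_ids = [
--         player_id
--         for player_id in player_points.keys()
--         if is_house_player_id(player_id)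
--     ]
--     if not house_ids:
--         return player_points
--
--     if not get_house_player_id(0) in player_points:
--         raise ValueError("House player 0 is not in player_points")
--
--     house_sum = sum(player_points[h_id] for h_id in house_ids)
--     for h_id in house_ids:
--         del player_points[h_id]
--
--     player_points[get_house_player_id(0)] = house_sum
--     return player_points
-- ===== SOURCE B (Python) =====
-- HOUSE_PLAYER_ID_PREFIX = "house"
--
--
-- def get_house_player_id(i: int) -> str:
--     return f"{HOUSE_PLAYER_ID_PREFIX}_{i}"
--
--
-- def is_house_player_id(player_id: str) -> bool:
--     return player_id.startswith(HOUSE_PLAYER_ID_PREFIX)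
--
--
-- def aggregate_house_points(player_points: dict[str, int]) -> dict[str, int]:
--     # Single pass: copy non-house entries, accumulate house points on the fly.
--     h0 = get_house_player_id(0)
--     result = {}
--     house_sum = 0
--     seen_house = False
--     seen_house_0 = False
--     for player_id, points in player_points.items():
--         if is_house_player_id(player_id):
--             seen_house = True
--             house_sum += points
--             if player_id == h0:
--                 seen_house_0 = True
--         else:
--             result[player_id] = points
--     if not seen_house:
--         return result
--     if not seen_house_0:
--         raise ValueError("House player 0 is not in player_points")
--     result[h0] = house_sum
--     return result
-- ===== Notes on version B (the rewrite author's own statement) =====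
-- stated objective: simpler
-- what changed: Replaces the four separate passes (collect house ids, membership test, sum by repeated dict lookup, delete loop) with one accumulating traversal of the items that copies non-house entries and sums house points as it goes.
import Mathlib
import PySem

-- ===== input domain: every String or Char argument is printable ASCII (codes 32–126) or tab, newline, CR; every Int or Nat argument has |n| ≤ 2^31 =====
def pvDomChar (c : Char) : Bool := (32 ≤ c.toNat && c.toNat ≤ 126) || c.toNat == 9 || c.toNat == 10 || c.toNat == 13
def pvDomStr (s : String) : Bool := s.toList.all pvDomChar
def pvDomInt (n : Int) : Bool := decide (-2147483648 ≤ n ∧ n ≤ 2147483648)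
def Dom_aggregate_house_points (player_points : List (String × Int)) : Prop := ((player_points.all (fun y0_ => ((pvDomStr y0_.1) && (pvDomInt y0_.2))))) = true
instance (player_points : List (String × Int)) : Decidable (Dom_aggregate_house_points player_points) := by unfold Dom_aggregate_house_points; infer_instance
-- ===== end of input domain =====

-- B replaces A's four passes (collect house ids, membership test, sum via lookups, delete loop)
-- with a single accumulating traversal; equivalence of return values is proved on dict-image inputs.

-- ===== PORT A =====
def get_house_player_id (i : Int) : String := "house" ++ "_" ++ PySem.Int.toStr i

def is_house_player_id (player_id : String) : Bool := PySem.Str.startswith player_id "house"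

def aggregate_house_points (player_points : List (String × Int)) : List (String × Int) :=
  let house_ids := (player_points.map (·.1)).filter (fun k => is_house_player_id k)
  if house_ids.isEmpty then player_points
  else if !(player_points.map (·.1)).contains (get_house_player_id 0) then
    []  -- raise ValueError("House player 0 is not in player_points"); excluded by Pre_
  else
    let house_sum := house_ids.foldl (fun s h =>
      s + (((player_points.find? (fun p => p.1 == h)).map (·.2)).getD 0)) 0
    let pp2 := house_ids.foldl (fun l h => l.eraseP (fun p => p.1 == h)) player_points
    pp2 ++ [(get_house_player_id 0, house_sum)]

-- ===== PORT B =====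
-- loop body of B's single pass: state = (result dict, house_sum, seen_house, seen_house_0)
def bStep (st : PySem.Dict String Int × Int × Bool × Bool) (p : String × Int) :
    PySem.Dict String Int × Int × Bool × Bool :=
  if is_house_player_id p.1 then
    (st.1, st.2.1 + p.2, true, st.2.2.2 || (p.1 == get_house_player_id 0))
  else
    (st.1.insert p.1 p.2, st.2.1, st.2.2.1, st.2.2.2)

def aggregate_house_points_alt (player_points : List (String × Int)) : List (String × Int) :=
  let st := player_points.foldl bStep (PySem.Dict.empty, 0, false, false)
  if !st.2.2.1 then st.1.items
  else if !st.2.2.2 then []  -- raise ValueError("House player 0 is not in player_points")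
  else (st.1.insert (get_house_player_id 0) st.2.1).items

-- ===== PRECONDITION & SPEC =====
-- Keys are pairwise distinct because the argument is the assoc-list image of a Python dict
-- (not a narrowing); Pre_ excludes inputs with a house-prefixed key but no "house_0" key,
-- on which A raises ValueError (B raises there too).
def Pre_aggregate_house_points (player_points : List (String × Int)) : Prop :=
  (player_points.map (·.1)).Nodup ∧
  ((∃ k ∈ player_points.map (·.1), is_house_player_id k = true) →
    "house_0" ∈ player_points.map (·.1))
instance (player_points : List (String × Int)) : Decidable (Pre_aggregate_house_points player_points) := by unfold Pre_aggregate_house_points; infer_instance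

def pvWitness_aggregate_house_points : (List (String × Int)) :=
  [("alice", 3), ("house_0", 2), ("house_1", 4)]

def Spec_aggregate_house_points (player_points : List (String × Int)) (out : List (String × Int)) : Prop := out = aggregate_house_points_alt player_points
instance (player_points : List (String × Int)) (out : List (String × Int)) : Decidable (Spec_aggregate_house_points player_points out) := by unfold Spec_aggregate_house_points; infer_instance

-- ===== CLAIM (what is proved, stated in full; the proofs are below) =====
def Claim_equal_aggregate_house_points : Prop := ∀ (player_points : List (String × Int)), Dom_aggregate_house_points player_points → Pre_aggregate_house_points player_points → Spec_aggregate_house_points player_points (aggregate_house_points player_points)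

-- ===== LEMMAS AND PROOFS =====

theorem h0_eq : get_house_player_id 0 = "house_0" := rfl

-- first-match lookup on a nodup-keyed assoc list returns the stored pair
theorem find_of_mem (pp : List (String × Int)) (k : String) (v : Int)
    (hnd : (pp.map (·.1)).Nodup) (hmem : (k, v) ∈ pp) :
    pp.find? (fun p => p.1 == k) = some (k, v) := by
  induction pp with
  | nil => cases hmem
  | cons q pp ih =>
    simp only [List.map_cons, List.nodup_cons] at hnd
    rcases List.mem_cons.mp hmem with h | h
    · subst h; simp [List.find?]
    · have hk : (q.1 == k) = false := by
        simp only [beq_eq_false_iff_ne]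
        intro he
        exact hnd.1 (he ▸ (List.mem_map.mpr ⟨(k, v), h, rfl⟩))
      simp [List.find?, hk, ih hnd.2 h]

theorem foldl_add_g (g : String → Int) (L : List String) (s : Int) :
    L.foldl (fun s h => s + g h) s = s + (L.map g).sum := by
  induction L generalizing s with
  | nil => simp
  | cons a L ih => simp [List.foldl_cons, ih, add_assoc]

-- the delete loop skips a pair whose key is not among the ids
theorem erase_skip (ids : List String) (q : String × Int) (l : List (String × Int))
    (h : ∀ h' ∈ ids, (q.1 == h') = false) :
    ids.foldl (fun acc h => acc.eraseP (fun p => p.1 == h)) (q :: l)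
      = q :: ids.foldl (fun acc h => acc.eraseP (fun p => p.1 == h)) l := by
  induction ids generalizing l with
  | nil => rfl
  | cons a ids ih =>
    simp only [List.foldl_cons, List.eraseP_cons, h a (List.mem_cons_self)]
    exact ih _ (fun h' hh => h h' (List.mem_cons_of_mem _ hh))

-- deleting every house key from pp yields the non-house filter
theorem erase_fold (pp : List (String × Int)) :
    ((pp.filter (fun p => is_house_player_id p.1)).map (·.1)).foldl
        (fun l h => l.eraseP (fun p => p.1 == h)) pp
      = pp.filter (fun p => !is_house_player_id p.1) := by
  induction pp with
  | nil => rfl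
  | cons q pp ih =>
    by_cases hq : is_house_player_id q.1 = true
    · simp only [List.filter_cons, hq]
      simpa using ih
    · have hq' : is_house_player_id q.1 = false := by simpa using hq
      rw [show List.filter (fun p => is_house_player_id p.1) (q :: pp)
            = List.filter (fun p => is_house_player_id p.1) pp by simp [hq'],
          show List.filter (fun p => !is_house_player_id p.1) (q :: pp)
            = q :: List.filter (fun p => !is_house_player_id p.1) pp by simp [hq']]
      rw [erase_skip, ih]
      intro h' hh
      simp only [List.mem_map, List.mem_filter] at hh
      obtain ⟨p, ⟨_, hp⟩, rfl⟩ := hh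
      simp only [beq_eq_false_iff_ne]
      intro he; rw [he] at hq'; rw [hp] at hq'; cases hq'

-- characterisation of B's single pass
theorem bfold (l : List (String × Int)) (d : PySem.Dict String Int) (s : Int) (sh sh0 : Bool) :
    l.foldl bStep (d, s, sh, sh0) =
      ((l.filter (fun p => !is_house_player_id p.1)).foldl (fun d p => d.insert p.1 p.2) d,
       s + ((l.filter (fun p => is_house_player_id p.1)).map (·.2)).sum,
       sh || l.any (fun p => is_house_player_id p.1),
       sh0 || l.any (fun p => is_house_player_id p.1 && (p.1 == get_house_player_id 0))) := by
  induction l generalizing d s sh sh0 with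
  | nil => simp
  | cons q l ih =>
    by_cases hq : is_house_player_id q.1 = true
    · simp [bStep, hq, ih, add_assoc, Bool.or_assoc]
    · have hq' : is_house_player_id q.1 = false := by simpa using hq
      simp [bStep, hq', ih]

-- ===== VERDICT (by name: the statement is the Claim_ definition above) =====
theorem aggregate_house_points_spec : Claim_equal_aggregate_house_points := by
  intro pp _ hpre
  obtain ⟨hnd, hh0⟩ := hpre
  unfold Spec_aggregate_house_points aggregate_house_points aggregate_house_points_alt
  rw [bfold]
  simp only [h0_eq]
  have hids : (pp.map (·.1)).filter (fun k => is_house_player_id k)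
      = (pp.filter (fun p => is_house_player_id p.1)).map (·.1) := by
    rw [List.filter_map]; rfl
  have hndf : ((pp.filter (fun p => !is_house_player_id p.1)).map (·.1)).Nodup := by
    have : List.Sublist ((pp.filter (fun p => !is_house_player_id p.1)).map (·.1))
        (pp.map (·.1)) := List.Sublist.map _ List.filter_sublist
    exact this.nodup hnd
  have hitems : ((pp.filter (fun p => !is_house_player_id p.1)).foldl
      (fun d p => d.insert p.1 p.2) PySem.Dict.empty).items
      = pp.filter (fun p => !is_house_player_id p.1) := by
    have h := PySem.Dict.items_foldl_insert_fresh
      (pp.filter (fun p => !is_house_player_id p.1))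
      (fun a : String × Int => a.1) (fun a : String × Int => a.2) PySem.Dict.empty
      (fun a _ => PySem.Dict.contains_empty _) hndf
    simpa using h
  by_cases hhouse : pp.any (fun p => is_house_player_id p.1) = true
  · -- at least one house key
    have hidsne : ((pp.map (·.1)).filter (fun k => is_house_player_id k)).isEmpty = false := by
      rw [hids]
      obtain ⟨p, hp, hip⟩ := List.any_eq_true.mp hhouse
      simp only [List.isEmpty_eq_false_iff, ne_eq, List.map_eq_nil_iff, List.filter_eq_nil_iff]
      intro h; exact absurd hip (by simpa using h p hp)
    have hmem0 : "house_0" ∈ pp.map (·.1) := by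
      apply hh0
      obtain ⟨p, hp, hip⟩ := List.any_eq_true.mp hhouse
      exact ⟨p.1, List.mem_map.mpr ⟨p, hp, rfl⟩, hip⟩
    have hcont : (pp.map (·.1)).contains "house_0" = true := by
      rw [List.contains_iff_mem]; exact hmem0
    have hseen0 : pp.any (fun p => is_house_player_id p.1 && (p.1 == "house_0")) = true := by
      obtain ⟨p, hp, hp0⟩ := List.mem_map.mp hmem0
      exact List.any_eq_true.mpr ⟨p, hp, by rw [hp0]; decide⟩
    have hsum : ((pp.map (·.1)).filter (fun k => is_house_player_id k)).foldl
        (fun s h => s + (((pp.find? (fun p => p.1 == h)).map (·.2)).getD 0)) 0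
        = ((pp.filter (fun p => is_house_player_id p.1)).map (·.2)).sum := by
      rw [hids, foldl_add_g, zero_add, List.map_map]
      congr 1
      apply List.map_congr_left
      intro p hp
      have hmem : p ∈ pp := (List.mem_filter.mp hp).1
      rw [Function.comp_apply, find_of_mem pp p.1 p.2 hnd hmem]
      rfl
    have hcont0 : ((pp.filter (fun p => !is_house_player_id p.1)).foldl
        (fun d p => d.insert p.1 p.2) PySem.Dict.empty).contains "house_0" = false := by
      rw [Bool.eq_false_iff]
      intro hc
      have := (PySem.Dict.contains_iff_mem_keys _ _).mp hc
      rw [show ∀ (d : PySem.Dict String Int), d.keys = d.items.map (·.1) from fun d => rfl,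
        hitems] at this
      obtain ⟨p, hp, hp0⟩ := List.mem_map.mp this
      have := (List.mem_filter.mp hp).2
      rw [hp0] at this
      exact absurd this (by decide)
    rw [if_neg (by rw [hidsne]; simp), if_neg (by rw [hcont]; simp), if_neg (by simp [hhouse]),
      if_neg (by simp [hseen0]), PySem.Dict.items_insert_of_not_contains _ _ hcont0,
      hitems, hsum, hids, erase_fold, zero_add]
  · -- no house keys
    have hhf : pp.any (fun p => is_house_player_id p.1) = false := by simpa using hhouse
    have hfe : pp.filter (fun p => is_house_player_id p.1) = [] := by
      rw [List.filter_eq_nil_iff]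
      intro p hp hc
      exact absurd (List.any_eq_true.mpr ⟨p, hp, hc⟩) hhouse
    have hfa : pp.filter (fun p => !is_house_player_id p.1) = pp := by
      rw [List.filter_eq_self]
      intro p hp
      rw [Bool.not_eq_true']
      by_contra hc
      have hc' : is_house_player_id p.1 = true := by simpa using hc
      exact absurd (List.any_eq_true.mpr ⟨p, hp, hc'⟩) hhouse
    rw [if_pos (by simp [hids, hfe])]
    simp only [hhf, hfa] at hitems ⊢
    simp [hitems]
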